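-- pv_equiv track=rewrite | github.com/PermutaTriangle/comb_spec_searcher | atrapv2/strategies/batch_strategies/lrm_rlm_boundaries.py | right_to_left_minima
-- ===== SOURCE A (Python) =====
-- def right_to_left_minima(perm):
--     """Return the indices of right to left minima."""
--     rlm = []
--     mn = len(perm)
--     for i in range(len(perm)-1,-1,-1):
--         if perm[i] < mn:
--             rlm.append(i)
--             mn = perm[i]
--     return rlm
-- ===== SOURCE B (Python) =====
-- def right_to_left_minima(perm):
--     """Return the indices of right to left minima."""
--     n = len(perm)
--     # suffix-minimum table: suffmin[i] = min(perm[i:] + [n]); sentinel n matches A's seed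
--     suffmin = [n]
--     for v in reversed(perm):
--         suffmin.append(min(v, suffmin[-1]))
--     suffmin.reverse()
--     return [i for i in range(n - 1, -1, -1) if perm[i] < suffmin[i + 1]]
-- ===== Notes on version B (the rewrite author's own statement) =====
-- stated objective: alternative
-- what changed: Replaces A's single fused right-to-left scan with a running-minimum state by a two-phase computation: first build a suffix-minimum table seeded with the sentinel len(perm), then filter the descending indices by comparing each element against the table.
import Mathlib
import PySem

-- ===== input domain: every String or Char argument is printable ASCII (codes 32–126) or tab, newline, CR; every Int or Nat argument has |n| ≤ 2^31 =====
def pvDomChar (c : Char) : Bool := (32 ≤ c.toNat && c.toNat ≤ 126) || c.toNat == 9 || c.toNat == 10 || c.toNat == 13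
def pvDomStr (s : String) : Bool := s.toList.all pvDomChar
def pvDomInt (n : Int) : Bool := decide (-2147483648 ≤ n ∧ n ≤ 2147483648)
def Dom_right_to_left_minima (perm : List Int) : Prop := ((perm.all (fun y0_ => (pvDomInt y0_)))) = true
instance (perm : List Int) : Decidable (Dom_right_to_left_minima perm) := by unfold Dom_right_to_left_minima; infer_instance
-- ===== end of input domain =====

-- B replaces A's fused right-to-left scan (running-minimum state) by a suffix-minimum
-- table pass followed by a separate filtering pass over the descending indices
-- (objective: alternative decomposition, same return value).

-- ===== PORT A =====
-- the loop index i is always in range, so perm[i] is ported with an unused default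
def right_to_left_minima (perm : List Int) : List Int :=
  ((PySem.List.pyRange ((perm.length : Int) - 1) (-1) (-1)).foldl
    (fun (st : List Int × Int) i =>
      if PySem.List.pyGetD perm i 0 < st.2 then (st.1 ++ [i], PySem.List.pyGetD perm i 0) else st)
    (([] : List Int), (perm.length : Int))).1

-- ===== PORT B =====
-- suffmin.append building ported as a foldl over the reversed list (suffmin[-1] via
-- pyGetD at -1); indices in the comprehension are always in range, so perm[i] /
-- suffmin[i+1] carry an unused default
def right_to_left_minima_alt (perm : List Int) : List Int :=
  let n : Int := (perm.length : Int)
  let suffmin : List Int :=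
    (perm.reverse.foldl (fun acc v => acc ++ [min v (PySem.List.pyGetD acc (-1) 0)]) [n]).reverse
  (PySem.List.pyRange (n - 1) (-1) (-1)).filter
    (fun i => PySem.List.pyGetD perm i 0 < PySem.List.pyGetD suffmin (i + 1) 0)

-- ===== PRECONDITION & SPEC =====
def Spec_right_to_left_minima (perm : List Int) (out : List Int) : Prop := out = right_to_left_minima_alt perm
instance (perm : List Int) (out : List Int) : Decidable (Spec_right_to_left_minima perm out) := by unfold Spec_right_to_left_minima; infer_instance

-- ===== CLAIM (what is proved, stated in full; the proofs are below) =====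
def Claim_equal_right_to_left_minima : Prop := ∀ (perm : List Int), Dom_right_to_left_minima perm → Spec_right_to_left_minima perm (right_to_left_minima perm)

-- ===== LEMMAS AND PROOFS =====

-- proof-side name for B's table-building step, with a fixed (irrelevant) headD default
def pvF (acc : List Int) (v : Int) : List Int := (min v (acc.headD 0)) :: acc

theorem pvF_cons (a v : Int) (t : List Int) : pvF (a :: t) v = min v a :: a :: t := rfl

-- proof-side name for B's suffix-minimum table
def pvSm (p : List Int) (s : Int) : List Int := p.reverse.foldl pvF [s]

-- B's append-building fold is the reverse of the cons-building fold pvF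
theorem pvApp_eq_reverse_pvF (l : List Int) :
    ∀ (acc : List Int), acc ≠ [] →
      l.foldl (fun acc v => acc ++ [min v (PySem.List.pyGetD acc (-1) 0)]) acc
        = (l.foldl pvF acc.reverse).reverse := by
  induction l with
  | nil => intro acc _; simp
  | cons v l ih =>
      intro acc h
      simp only [List.foldl_cons]
      rw [PySem.List.pyGetD_neg_one acc 0 h]
      rw [ih (acc ++ [min v (acc.getLast h)]) (by simp)]
      have hrev : (acc ++ [min v (acc.getLast h)]).reverse = pvF acc.reverse v := by
        rw [List.reverse_append, pvF]
        have hhd : acc.reverse.headD 0 = acc.getLast h := by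
          rw [List.headD_eq_head?_getD, List.head?_reverse, List.getLast?_eq_some_getLast h]
          rfl
        rw [hhd]
        rfl
      rw [hrev]

theorem pvSm_split (l : List Int) :
    ∀ (a : Int) (t : List Int), l.foldl pvF (a :: t) = l.foldl pvF [a] ++ t := by
  induction l with
  | nil => intro a t; rfl
  | cons v l ih =>
      intro a t
      simp only [List.foldl_cons, pvF_cons]
      rw [ih (min v a) (a :: t), ih (min v a) [a], List.append_assoc]
      rfl

theorem pvSm_append (q : List Int) (x s : Int) :
    pvSm (q ++ [x]) s = pvSm q (min x s) ++ [s] := by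
  simp only [pvSm, List.reverse_append, List.reverse_singleton, List.singleton_append,
    List.foldl_cons, pvF_cons]
  exact pvSm_split q.reverse (min x s) [s]

theorem pvSm_length (q : List Int) (s : Int) : (pvSm q s).length = q.length + 1 := by
  have h : ∀ (l : List Int) (a : Int), (l.foldl pvF [a]).length = l.length + 1 := by
    intro l
    induction l with
    | nil => intro a; rfl
    | cons v l ih =>
        intro a
        simp only [List.foldl_cons, pvF_cons]
        rw [pvSm_split l (min v a) [a], List.length_append, ih (min v a)]
        simp
  simpa [pvSm] using h q.reverse s

-- the step function of A's loop, over an arbitrary list p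
def pvStep (p : List Int) (st : List Int × Int) (i : Int) : List Int × Int :=
  if PySem.List.pyGetD p i 0 < st.2 then (st.1 ++ [i], PySem.List.pyGetD p i 0) else st

theorem pvStep_shift (p : List Int) (R : List Int) :
    ∀ (c : List Int) (m : Int),
      R.foldl (pvStep p) (c, m)
        = (c ++ (R.foldl (pvStep p) ([], m)).1, (R.foldl (pvStep p) ([], m)).2) := by
  induction R with
  | nil => intro c m; simp
  | cons i R ih =>
      intro c m
      simp only [List.foldl_cons, pvStep]
      by_cases h : PySem.List.pyGetD p i 0 < m
      · simp only [if_pos h, List.nil_append]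
        rw [ih (c ++ [i]), ih [i], List.append_assoc]
      · simp only [if_neg h]
        exact ih c m

theorem pvGetD_append_left (q : List Int) (x : Int) (i : Int)
    (h0 : 0 ≤ i) (h1 : i < (q.length : Int)) :
    PySem.List.pyGetD (q ++ [x]) i 0 = PySem.List.pyGetD q i 0 := by
  rw [PySem.List.pyGetD_eq_getElem (q ++ [x]) 0 h0 (by simp; omega),
      PySem.List.pyGetD_eq_getElem q 0 h0 h1]
  rw [List.getElem_append_left (by omega)]

theorem pvGetD_concat_length (q : List Int) (x : Int) :
    PySem.List.pyGetD (q ++ [x]) (q.length : Int) 0 = x := by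
  rw [PySem.List.pyGetD_eq_getElem (q ++ [x]) 0 (by omega) (by simp)]
  simp

-- main invariant: A's fused scan seeded at s equals B's filter against the table seeded at s
theorem pvMain (p : List Int) :
    ∀ s : Int,
      ((PySem.List.pyRange ((p.length : Int) - 1) (-1) (-1)).foldl (pvStep p) ([], s)).1
        = (PySem.List.pyRange ((p.length : Int) - 1) (-1) (-1)).filter
            (fun i => PySem.List.pyGetD p i 0 < PySem.List.pyGetD (pvSm p s) (i + 1) 0) := by
  induction p using List.reverseRecOn with
  | nil =>
      intro s
      rw [PySem.List.pyRange_neg_one_eq_nil (by simp)]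
      rfl
  | append_singleton q x ih =>
      intro s
      have hlen : (((q ++ [x]).length : Int)) - 1 = (q.length : Int) := by
        simp only [List.length_append, List.length_cons, List.length_nil]
        push_cast; ring
      rw [hlen, PySem.List.pyRange_neg_one_cons (by omega)]
      set R := PySem.List.pyRange ((q.length : Int) - 1) (-1) (-1) with hR
      have hmem : ∀ i ∈ R, 0 ≤ i ∧ i < (q.length : Int) := by
        intro i hi
        rw [hR] at hi
        have := (PySem.List.mem_pyRange_neg_one).1 hi
        omega
      have hsm := pvSm_append q x s
      have hsmlen := pvSm_length q (min x s)
      have hget_top : PySem.List.pyGetD (q ++ [x]) (q.length : Int) 0 = x :=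
        pvGetD_concat_length q x
      have hsm_top : PySem.List.pyGetD (pvSm (q ++ [x]) s) ((q.length : Int) + 1) 0 = s := by
        rw [hsm]
        have h : ((q.length : Int) + 1) = ((pvSm q (min x s)).length : Int) := by
          rw [hsmlen]; push_cast; ring
        rw [h]
        exact pvGetD_concat_length _ s
      have hget_R : ∀ i ∈ R, PySem.List.pyGetD (q ++ [x]) i 0 = PySem.List.pyGetD q i 0 := by
        intro i hi
        exact pvGetD_append_left q x i (hmem i hi).1 (hmem i hi).2
      have hsm_R : ∀ i ∈ R,
          PySem.List.pyGetD (pvSm (q ++ [x]) s) (i + 1) 0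
            = PySem.List.pyGetD (pvSm q (min x s)) (i + 1) 0 := by
        intro i hi
        rw [hsm]
        have h1 : (0 : Int) ≤ i + 1 := by have := (hmem i hi).1; omega
        have h2 : i + 1 < ((pvSm q (min x s)).length : Int) := by
          rw [hsmlen]; push_cast; have := (hmem i hi).2; omega
        rw [PySem.List.pyGetD_eq_getElem (pvSm q (min x s) ++ [s]) 0 h1
              (by rw [List.length_append]; push_cast; omega),
            PySem.List.pyGetD_eq_getElem (pvSm q (min x s)) 0 h1 h2]
        rw [List.getElem_append_left (by omega)]
      -- left side: peel the first step, then shift the accumulated prefix out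
      have lhs_eq :
          ((((q.length : Int)) :: R).foldl (pvStep (q ++ [x])) ([], s)).1
            = (if x < s then [(q.length : Int)] else [])
              ++ (R.foldl (pvStep q) ([], min x s)).1 := by
        simp only [List.foldl_cons, pvStep, hget_top, List.nil_append]
        have hcongr : ∀ st : List Int × Int,
            R.foldl (pvStep (q ++ [x])) st = R.foldl (pvStep q) st := by
          intro st
          apply PySem.List.foldl_congr_mem
          intro acc i hi
          simp only [pvStep, hget_R i hi]
        by_cases h : x < s
        · have hmin : min x s = x := min_eq_left (le_of_lt h)
          simp only [if_pos h]
          rw [hcongr, pvStep_shift, hmin]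
        · have hmin : min x s = s := min_eq_right (not_lt.1 h)
          simp only [if_neg h]
          rw [hcongr, hmin]
          simp
      rw [lhs_eq, List.filter_cons]
      have hhead : (decide (PySem.List.pyGetD (q ++ [x]) (q.length : Int) 0
            < PySem.List.pyGetD (pvSm (q ++ [x]) s) ((q.length : Int) + 1) 0)) = decide (x < s) := by
        rw [hget_top, hsm_top]
      have hfilt : R.filter (fun i => PySem.List.pyGetD (q ++ [x]) i 0
            < PySem.List.pyGetD (pvSm (q ++ [x]) s) (i + 1) 0)
          = R.filter (fun i => PySem.List.pyGetD q i 0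
            < PySem.List.pyGetD (pvSm q (min x s)) (i + 1) 0) := by
        apply List.filter_congr
        intro i hi
        simp only [hget_R i hi, hsm_R i hi]
      rw [hhead, hfilt, ← ih (min x s)]
      by_cases h : x < s <;> simp [h]

-- ===== VERDICT (by name: the statement is the Claim_ definition above) =====
theorem right_to_left_minima_spec : Claim_equal_right_to_left_minima := by
  intro perm _
  unfold Spec_right_to_left_minima right_to_left_minima right_to_left_minima_alt
  simp only []
  rw [pvApp_eq_reverse_pvF perm.reverse [(perm.length : Int)] (by simp)]
  simp only [List.reverse_cons, List.reverse_nil, List.nil_append, List.reverse_reverse]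
  exact pvMain perm (perm.length : Int)
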